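-- pv_equiv track=rewrite | github.com/NathanSkene/RobotRave | generate_choreography.py | consolidate_repeats
-- ===== SOURCE A (Python) =====
-- def consolidate_repeats(choreography, max_repeats=3):
--     """Consolidate consecutive identical actions.
--
--     Args:
--         choreography: List of choreography entries
--         max_repeats: Maximum times to repeat before forcing variety
--
--     Returns:
--         Consolidated choreography
--     """
--     if not choreography:
--         return choreography
--
--     consolidated = [choreography[0]]
--     repeat_count = 1
--
--     for entry in choreography[1:]:
--         if entry['action'] == consolidated[-1]['action']:
--             repeat_count += 1
--             if repeat_count <= max_repeats:
--                 # Keep as separate entry (will repeat action)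
--                 consolidated.append(entry)
--         else:
--             repeat_count = 1
--             consolidated.append(entry)
--
--     return consolidated
-- ===== SOURCE B (Python) =====
-- def consolidate_repeats(choreography, max_repeats=3):
--     """Consolidate consecutive identical actions.
--
--     Scans the list with two pointers to find each maximal run of entries
--     sharing the same 'action', and keeps only the first max(1, max_repeats)
--     entries of each run.
--     """
--     if len(choreography) < 2:
--         return choreography
--
--     keep = max(1, max_repeats)
--     out = []
--     i, n = 0, len(choreography)
--     while i < n:
--         a = choreography[i]['action']
--         j = i + 1
--         while j < n and choreography[j]['action'] == a:
--             j += 1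
--         out.extend(choreography[i:min(j, i + keep)])
--         i = j
--     return out
-- ===== Notes on version B (the rewrite author's own statement) =====
-- stated objective: alternative
-- what changed: B replaces A's per-entry running repeat counter and conditional append with a two-pointer scan that finds each maximal same-action run and emits its first max(1, max_repeats) entries via a slice.
import Mathlib
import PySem

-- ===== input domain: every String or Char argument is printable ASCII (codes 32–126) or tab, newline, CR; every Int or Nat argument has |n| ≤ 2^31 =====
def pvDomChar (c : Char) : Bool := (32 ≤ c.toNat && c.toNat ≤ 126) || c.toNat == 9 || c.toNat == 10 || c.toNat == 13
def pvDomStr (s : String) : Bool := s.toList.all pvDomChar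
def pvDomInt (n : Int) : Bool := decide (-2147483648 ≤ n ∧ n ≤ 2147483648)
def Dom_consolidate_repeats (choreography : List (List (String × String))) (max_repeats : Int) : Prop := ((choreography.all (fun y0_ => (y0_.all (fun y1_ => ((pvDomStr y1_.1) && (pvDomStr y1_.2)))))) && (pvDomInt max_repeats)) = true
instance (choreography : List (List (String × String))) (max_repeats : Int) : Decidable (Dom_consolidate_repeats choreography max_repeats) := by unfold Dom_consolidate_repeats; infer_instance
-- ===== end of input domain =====

-- B truncates each maximal same-action run found by an explicit two-pointer scan, replacing A's
-- running repeat counter; same cost, different decomposition (objective: alternative).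

-- entry['action']: first-match lookup in the association list (shared by both ports)
def pvAct (entry : List (String × String)) : Option String :=
  (entry.find? (fun kv => kv.1 == "action")).map (·.2)

-- ===== PORT A =====
-- literal transliteration of A: fold over choreography[1:] with state (consolidated, repeat_count);
-- consolidated[-1] is written getLast?.getD [] (consolidated is never empty)
def consolidate_repeats (choreography : List (List (String × String))) (max_repeats : Int) : List (List (String × String)) :=
  match choreography with
  | [] => choreography
  | first :: rest =>
    (rest.foldl
      (fun (st : List (List (String × String)) × Int) entry =>
        if pvAct entry == pvAct (st.1.getLast?.getD []) then
          let rc := st.2 + 1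
          if rc ≤ max_repeats then (st.1 ++ [entry], rc) else (st.1, rc)
        else
          (st.1 ++ [entry], (1 : Int)))
      ([first], 1)).1

-- ===== PORT B =====
-- B's run scan: the inner `while j < n and choreography[j]['action'] == a` is the takeWhile/dropWhile
-- split of the remaining list; the slice choreography[i:min(j, i+keep)] is `run.take keep`
-- (exact: the slice bounds are in range and keep = max 1 max_repeats ≥ 0).
def consolidate_repeats_go (max_repeats : Int) : List (List (String × String)) → List (List (String × String))
  | [] => []
  | e :: rest =>
    let p := fun x => pvAct x == pvAct e
    (e :: rest.takeWhile p).take (max 1 max_repeats).toNat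
      ++ consolidate_repeats_go max_repeats (rest.dropWhile p)
termination_by l => l.length
decreasing_by simpa using Nat.lt_succ_of_le (List.length_dropWhile_le _ _)

def consolidate_repeats_alt (choreography : List (List (String × String))) (max_repeats : Int) : List (List (String × String)) :=
  if choreography.length < 2 then choreography
  else consolidate_repeats_go max_repeats choreography

-- ===== PRECONDITION & SPEC =====
-- Pre_ excludes exactly the inputs on which the Python A raises KeyError: lists of length ≥ 2
-- containing an entry without an 'action' key (B raises there too).
def Pre_consolidate_repeats (choreography : List (List (String × String))) (max_repeats : Int) : Prop :=
  choreography.length ≤ 1 ∨ ∀ entry ∈ choreography, (pvAct entry).isSome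
instance (choreography : List (List (String × String))) (max_repeats : Int) : Decidable (Pre_consolidate_repeats choreography max_repeats) := by unfold Pre_consolidate_repeats; infer_instance

def pvWitness_consolidate_repeats : (List (List (String × String))) × Int :=
  ([[("action", "wave"), ("beat", "1")], [("action", "wave"), ("beat", "2")], [("action", "spin"), ("beat", "3")]], 3)

def Spec_consolidate_repeats (choreography : List (List (String × String))) (max_repeats : Int) (out : List (List (String × String))) : Prop := out = consolidate_repeats_alt choreography max_repeats
instance (choreography : List (List (String × String))) (max_repeats : Int) (out : List (List (String × String))) : Decidable (Spec_consolidate_repeats choreography max_repeats out) := by unfold Spec_consolidate_repeats; infer_instance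

-- ===== CLAIM (what is proved, stated in full; the proofs are below) =====
def Claim_equal_consolidate_repeats : Prop := ∀ (choreography : List (List (String × String))) (max_repeats : Int), Dom_consolidate_repeats choreography max_repeats → Pre_consolidate_repeats choreography max_repeats → Spec_consolidate_repeats choreography max_repeats (consolidate_repeats choreography max_repeats)

-- ===== LEMMAS AND PROOFS =====

-- A's fold step, named for the proofs (definitionally the lambda in the port of A)
def pvStepA (max_repeats : Int) (st : List (List (String × String)) × Int) (entry : List (String × String)) : List (List (String × String)) × Int :=
  if pvAct entry == pvAct (st.1.getLast?.getD []) then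
    let rc := st.2 + 1
    if rc ≤ max_repeats then (st.1 ++ [entry], rc) else (st.1, rc)
  else
    (st.1 ++ [entry], (1 : Int))

theorem pv_A_eq_fold (first : List (String × String)) (rest : List (List (String × String))) (m : Int) :
    consolidate_repeats (first :: rest) m = (rest.foldl (pvStepA m) ([first], 1)).1 := rfl

-- last element's action after appending a nonempty block whose elements all have action a
theorem pv_last_action (acc l : List (List (String × String))) (a : Option String)
    (hne : l ≠ []) (ha : ∀ x ∈ l, pvAct x = a) :
    pvAct (((acc ++ l).getLast?).getD []) = a := by
  rw [List.getLast?_append_of_ne_nil (l₁ := acc) hne, List.getLast?_eq_some_getLast hne,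
    Option.getD_some]
  exact ha _ (List.getLast_mem hne)

-- within a run all of whose elements have the last-kept action, A appends while the counter allows
theorem pv_run_lemma (m : Int) (a : Option String) :
    ∀ (run : List (List (String × String))) (tail acc : List (List (String × String))) (rc : Int),
      (∀ x ∈ run, pvAct x = a) →
      pvAct ((acc.getLast?).getD []) = a →
      List.foldl (pvStepA m) (acc, rc) (run ++ tail)
        = List.foldl (pvStepA m) (acc ++ run.take (m - rc).toNat, rc + run.length) tail := by
  intro run
  induction run with
  | nil => intro tail acc rc _ _; simp
  | cons x xs ih =>
    intro tail acc rc hall hlast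
    have hx : pvAct x = a := hall x (List.mem_cons_self)
    have hcond : (pvAct x == pvAct ((acc.getLast?).getD [])) = true := by
      rw [hx, hlast]; simp
    simp only [List.cons_append, List.foldl_cons]
    have hstep : pvStepA m (acc, rc) x
        = if rc + 1 ≤ m then (acc ++ [x], rc + 1) else (acc, rc + 1) := by
      simp [pvStepA, hcond]
    rw [hstep]
    by_cases hle : rc + 1 ≤ m
    · rw [if_pos hle]
      have hlast' : pvAct (((acc ++ [x]).getLast?).getD []) = a := by
        apply pv_last_action _ _ _ (by simp)
        intro y hy; simp at hy; subst hy; exact hx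
      rw [ih tail (acc ++ [x]) (rc + 1) (fun y hy => hall y (List.mem_cons_of_mem _ hy)) hlast']
      have htake : acc ++ [x] ++ xs.take (m - (rc + 1)).toNat
          = acc ++ (x :: xs).take (m - rc).toNat := by
        have h1 : (m - rc).toNat = (m - (rc + 1)).toNat + 1 := by omega
        rw [h1, List.take_succ_cons, List.append_assoc, List.singleton_append]
      rw [htake]
      have hlen2 : rc + 1 + (xs.length : Int) = rc + ((x :: xs).length : Int) := by
        simp only [List.length_cons]; push_cast; ring
      rw [hlen2]
    · rw [if_neg hle]
      rw [ih tail acc (rc + 1) (fun y hy => hall y (List.mem_cons_of_mem _ hy)) hlast]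
      have h0 : (m - (rc + 1)).toNat = 0 := by omega
      have h0' : (m - rc).toNat = 0 := by omega
      rw [h0, h0']
      have hlen2 : rc + 1 + (xs.length : Int) = rc + ((x :: xs).length : Int) := by
        simp only [List.length_cons]; push_cast; ring
      rw [List.take_zero, List.take_zero, hlen2]

theorem pv_keep_cons (m : Int) (e : List (String × String)) (run : List (List (String × String))) :
    (e :: run).take (max 1 m).toNat = e :: run.take (m - 1).toNat := by
  have h : (max 1 m).toNat = (m - 1).toNat + 1 := by omega
  rw [h, List.take_succ_cons]

-- main correspondence: A's fold after a fresh append equals B's run recursion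
theorem pv_key (m : Int) :
    ∀ (n : ℕ) (rest : List (List (String × String))), rest.length ≤ n →
      ∀ (acc : List (List (String × String))) (e : List (String × String)),
        (List.foldl (pvStepA m) (acc ++ [e], 1) rest).1
          = acc ++ consolidate_repeats_go m (e :: rest) := by
  intro n
  induction n with
  | zero =>
    intro rest hlen acc e
    have : rest = [] := List.eq_nil_of_length_eq_zero (Nat.le_zero.mp hlen)
    subst this
    rw [consolidate_repeats_go]
    simp [pv_keep_cons, consolidate_repeats_go]
  | succ n ih =>
    intro rest hlen acc e
    set p : List (String × String) → Bool :=
      fun x => pvAct x == pvAct e with hp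
    have hsplit : rest = rest.takeWhile p ++ rest.dropWhile p := (List.takeWhile_append_dropWhile).symm
    have hrun : ∀ x ∈ rest.takeWhile p, pvAct x = pvAct e := by
      intro x hx
      have := List.mem_takeWhile_imp hx
      rw [hp] at this; simpa using this
    have hlaste : pvAct (((acc ++ [e]).getLast?).getD []) = pvAct e := by
      apply pv_last_action _ _ _ (by simp)
      intro y hy; simp at hy; subst hy; rfl
    have hfold := pv_run_lemma m (pvAct e) (rest.takeWhile p) (rest.dropWhile p) (acc ++ [e]) 1 hrun hlaste
    rw [← hsplit] at hfold
    rw [hfold]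
    rw [consolidate_repeats_go]
    simp only [← hp]
    cases hdw : rest.dropWhile p with
    | nil =>
      simp only [List.foldl_nil, pv_keep_cons, consolidate_repeats_go]
      simp [List.append_assoc]
    | cons x xs =>
      have hxfalse : p x = false := by
        have := List.head?_dropWhile_not p rest
        rw [hdw] at this; simpa using this
      have hkept : ∀ y ∈ [e] ++ (rest.takeWhile p).take (m - 1).toNat,
          pvAct y = pvAct e := by
        intro y hy
        rcases List.mem_append.mp hy with h | h
        · simp at h; subst h; rfl
        · exact hrun y (List.mem_of_mem_take h)
      have hlast2 : pvAct (((acc ++ [e] ++ (rest.takeWhile p).take (m - 1).toNat).getLast?).getD [])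
          = pvAct e := by
        rw [List.append_assoc]
        exact pv_last_action _ _ _ (by simp) hkept
      have hcondf : (pvAct x
          == pvAct (((acc ++ [e] ++ (rest.takeWhile p).take (m - 1).toNat).getLast?).getD [])) = false := by
        rw [hlast2]
        rw [hp] at hxfalse; exact hxfalse
      have hstep : pvStepA m (acc ++ [e] ++ (rest.takeWhile p).take (m - 1).toNat, 1 + ((rest.takeWhile p).length : Int)) x
          = (acc ++ [e] ++ (rest.takeWhile p).take (m - 1).toNat ++ [x], 1) := by
        simp only [pvStepA]
        rw [hcondf]
        simp
      rw [List.foldl_cons, hstep]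
      have hxslen : xs.length ≤ n := by
        have h1 := congrArg List.length hsplit
        rw [hdw] at h1
        simp [List.length_append] at h1
        omega
      rw [ih xs hxslen (acc ++ [e] ++ (rest.takeWhile p).take (m - 1).toNat) x]
      simp [pv_keep_cons, List.append_assoc]

-- ===== VERDICT (by name: the statement is the Claim_ definition above) =====
theorem consolidate_repeats_spec : Claim_equal_consolidate_repeats := by
  intro ch m _ _
  unfold Spec_consolidate_repeats
  cases ch with
  | nil => simp [consolidate_repeats, consolidate_repeats_alt]
  | cons first rest =>
    rw [pv_A_eq_fold]
    have h := pv_key m rest.length rest (le_refl _) [] first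
    simp only [List.nil_append] at h
    rw [h]
    unfold consolidate_repeats_alt
    cases rest with
    | nil =>
      simp only [List.length_cons, List.length_nil]
      rw [if_pos (by omega)]
      rw [consolidate_repeats_go]
      simp [pv_keep_cons, consolidate_repeats_go]
    | cons b bs =>
      rw [if_neg (by simp)]
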